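-- pv_equiv track=rewrite | github.com/torenapart/CP104 | quar7316_l08/src/functions.py | list_categorize
-- ===== SOURCE A (Python) =====
-- def list_categorize(values):
--     """
--     -------------------------------------------------------
--     Returns data about the categories of values in a list.
--     Use: negatives, positives, zeroes, evens, odds = list_categorize(values)
--     -------------------------------------------------------
--     Parameters:
--         values - a list of values (list of int)
--     Returns:
--         negatives - the number of negative values (int)
--         positives - the number of positive values (int)
--         zeroes - the number of zeroes (int)
--         evens - the number of even values (int)
--         odds - the number of odd values (int)
--     -------------------------------------------------------
--     """
--     negatives = 0
--     positives = 0
--     zeroes = 0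
--     evens = 0
--     odds = 0
--     for v in values:
--         if v < 0:
--             negatives += 1
--             rem = v % 2
--             if rem == 0:
--                 evens += 1
--             elif rem != 0:
--                 odds += 1
--         elif v > 0:
--             positives += 1
--             rem = v % 2
--             if rem == 0:
--                 evens += 1
--             elif rem != 0:
--                 odds += 1
--         elif v == 0:
--             zeroes += 1
--             rem = v % 2
--             if rem == 0:
--                 evens += 1
--             elif rem != 0:
--                 odds += 1
--
--     return negatives, positives, zeroes, evens, odds
-- ===== SOURCE B (Python) =====
-- def list_categorize(values):
--     negatives = sum(1 for v in values if v < 0)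
--     positives = sum(1 for v in values if v > 0)
--     zeroes = sum(1 for v in values if v == 0)
--     evens = sum(1 for v in values if v % 2 == 0)
--     odds = sum(1 for v in values if v % 2 != 0)
--     return negatives, positives, zeroes, evens, odds
-- ===== Notes on version B (the rewrite author's own statement) =====
-- stated objective: idiomatic
-- what changed: Replaces the single fused loop with nested category/parity branching by five independent single-predicate scans (one count per returned category).
import Mathlib
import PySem

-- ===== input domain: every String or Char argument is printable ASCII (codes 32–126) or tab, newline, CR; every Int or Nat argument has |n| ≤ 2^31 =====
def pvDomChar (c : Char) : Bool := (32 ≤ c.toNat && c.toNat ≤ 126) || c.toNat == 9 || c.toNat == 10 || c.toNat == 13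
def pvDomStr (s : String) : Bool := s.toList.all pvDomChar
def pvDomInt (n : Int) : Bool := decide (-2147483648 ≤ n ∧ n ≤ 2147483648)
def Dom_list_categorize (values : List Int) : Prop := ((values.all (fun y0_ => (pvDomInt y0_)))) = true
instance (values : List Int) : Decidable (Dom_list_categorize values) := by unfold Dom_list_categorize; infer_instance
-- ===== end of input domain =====

-- B replaces A's single fused loop (nested category/parity branches) with five independent one-predicate counts; objective: idiomatic.


-- ===== PORT A =====
-- loop body of A: nested branching on sign, then on v % 2 (Python mod)
def list_categorize_step (st : Int × Int × Int × Int × Int) (v : Int) : Int × Int × Int × Int × Int :=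
  let (negatives, positives, zeroes, evens, odds) := st
  if v < 0 then
    let rem := PySem.Int.mod v 2
    if rem = 0 then (negatives + 1, positives, zeroes, evens + 1, odds)
    else (negatives + 1, positives, zeroes, evens, odds + 1)
  else if v > 0 then
    let rem := PySem.Int.mod v 2
    if rem = 0 then (negatives, positives + 1, zeroes, evens + 1, odds)
    else (negatives, positives + 1, zeroes, evens, odds + 1)
  else if v = 0 then
    let rem := PySem.Int.mod v 2
    if rem = 0 then (negatives, positives, zeroes + 1, evens + 1, odds)
    else (negatives, positives, zeroes + 1, evens, odds + 1)
  else st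

def list_categorize (values : List Int) : Int × Int × Int × Int × Int :=
  values.foldl list_categorize_step (0, 0, 0, 0, 0)

-- ===== PORT B =====
def list_categorize_alt (values : List Int) : Int × Int × Int × Int × Int :=
  ((values.countP (fun v => v < 0) : Int),
   (values.countP (fun v => v > 0) : Int),
   (values.countP (fun v => v = 0) : Int),
   (values.countP (fun v => PySem.Int.mod v 2 = 0) : Int),
   (values.countP (fun v => PySem.Int.mod v 2 ≠ 0) : Int))

-- ===== PRECONDITION & SPEC =====
def Spec_list_categorize (values : List Int) (out : Int × Int × Int × Int × Int) : Prop := out = list_categorize_alt values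
instance (values : List Int) (out : Int × Int × Int × Int × Int) : Decidable (Spec_list_categorize values out) := by unfold Spec_list_categorize; infer_instance

-- ===== CLAIM (what is proved, stated in full; the proofs are below) =====
def Claim_equal_list_categorize : Prop := ∀ (values : List Int), Dom_list_categorize values → Spec_list_categorize values (list_categorize values)

-- ===== LEMMAS AND PROOFS =====
theorem list_categorize_foldl (values : List Int) (n p z e o : Int) :
    values.foldl list_categorize_step (n, p, z, e, o) =
      (n + (values.countP (fun v => v < 0) : Int),
       p + (values.countP (fun v => v > 0) : Int),
       z + (values.countP (fun v => v = 0) : Int),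
       e + (values.countP (fun v => PySem.Int.mod v 2 = 0) : Int),
       o + (values.countP (fun v => PySem.Int.mod v 2 ≠ 0) : Int)) := by
  induction values generalizing n p z e o with
  | nil => simp
  | cons v vs ih =>
    have hm : PySem.Int.mod v 2 = v % 2 := PySem.Int.mod_eq_emod_of_pos (by norm_num)
    simp only [List.foldl_cons, list_categorize_step, hm]
    split_ifs <;> rw [ih] <;>
      simp only [hm, List.countP_cons, decide_eq_true_eq, Prod.mk.injEq] <;>
      refine ⟨?_, ?_, ?_, ?_, ?_⟩ <;> push_cast <;> split_ifs <;> omega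

-- ===== VERDICT (by name: the statement is the Claim_ definition above) =====
theorem list_categorize_spec : Claim_equal_list_categorize := by
  intro values _
  unfold Spec_list_categorize list_categorize list_categorize_alt
  simp [list_categorize_foldl]
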